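-- pv_equiv track=rewrite | github.com/altynaltyn/Final-project | task5_restaurant_recommendation.py | filter_reviews_by_dishes
-- ===== SOURCE A (Python) =====
-- def filter_reviews_by_dishes(reviews, dishes):
--     filtered_reviews = []
--     for review in reviews:
--         for dish in dishes:
--             if dish in review.lower():
--                 filtered_reviews.append((dish, review))
--                 break
--     return filtered_reviews
-- ===== SOURCE B (Python) =====
-- def filter_reviews_by_dishes(reviews, dishes):
--     lows = [r.lower() for r in reviews]
--     best = [None] * len(reviews)
--     for dish in reversed(dishes):
--         for i in range(len(reviews)):
--             if dish in lows[i]: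
--                 best[i] = dish
--     return [(b, r) for b, r in zip(best, reviews) if b is not None]
-- ===== Notes on version B (the rewrite author's own statement) =====
-- stated objective: alternative
-- what changed: B inverts the loop nesting: it lowers each review once, sweeps the dishes in reverse order over a best-match array (later overwrites make the first-listed dish win), then emits matched reviews in order, instead of A's per-review inner scan with break and repeated lower().
import Mathlib
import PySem

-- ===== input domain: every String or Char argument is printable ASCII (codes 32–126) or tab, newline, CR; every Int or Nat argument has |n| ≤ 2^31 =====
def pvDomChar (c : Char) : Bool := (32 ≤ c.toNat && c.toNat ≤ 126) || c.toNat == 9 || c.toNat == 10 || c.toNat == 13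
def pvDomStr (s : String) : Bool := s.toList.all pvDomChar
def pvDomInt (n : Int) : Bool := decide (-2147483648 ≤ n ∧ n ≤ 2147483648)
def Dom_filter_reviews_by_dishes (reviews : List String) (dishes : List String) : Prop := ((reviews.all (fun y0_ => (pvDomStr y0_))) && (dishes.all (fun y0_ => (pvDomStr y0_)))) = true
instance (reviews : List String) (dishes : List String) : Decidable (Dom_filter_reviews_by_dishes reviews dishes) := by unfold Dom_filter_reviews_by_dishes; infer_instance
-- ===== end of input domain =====

-- B inverts the loop nesting (dishes-outer reverse sweep over a best-match array, one lower() per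
-- review) instead of A's per-review inner scan with break; same cost class, alternative structure.

-- ===== PORT A =====
-- inner 'for dish in dishes: … break' of A as structural recursion
def firstDishA : List String → String → Option String
  | [], _ => none
  | d :: ds, low => if PySem.Str.isIn d low then some d else firstDishA ds low

def filter_reviews_by_dishes (reviews : List String) (dishes : List String) : List (String × String) :=
  reviews.foldl (fun acc review =>
    match firstDishA dishes (PySem.Str.lower review) with
    | some d => acc ++ [(d, review)]
    | none => acc) []

-- ===== PORT B =====
-- inner 'for i in range(len(reviews)): best[i] = …' of B: pointwise update of the best array
def bInner (dish : String) (best : List (Option String)) (lows : List String) : List (Option String) :=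
  (best.zip lows).map (fun bl => if PySem.Str.isIn dish bl.2 then some dish else bl.1)

def filter_reviews_by_dishes_alt (reviews : List String) (dishes : List String) : List (String × String) :=
  let lows := reviews.map PySem.Str.lower
  let best := dishes.reverse.foldl (fun best dish => bInner dish best lows)
    (List.replicate reviews.length (none : Option String))
  (best.zip reviews).filterMap (fun br => br.1.map (fun d => (d, br.2)))

-- ===== PRECONDITION & SPEC =====
def Spec_filter_reviews_by_dishes (reviews : List String) (dishes : List String) (out : List (String × String)) : Prop := out = filter_reviews_by_dishes_alt reviews dishes
instance (reviews : List String) (dishes : List String) (out : List (String × String)) : Decidable (Spec_filter_reviews_by_dishes reviews dishes out) := by unfold Spec_filter_reviews_by_dishes; infer_instance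

-- ===== CLAIM (what is proved, stated in full; the proofs are below) =====
def Claim_equal_filter_reviews_by_dishes : Prop := ∀ (reviews : List String) (dishes : List String), Dom_filter_reviews_by_dishes reviews dishes → Spec_filter_reviews_by_dishes reviews dishes (filter_reviews_by_dishes reviews dishes)

-- ===== LEMMAS AND PROOFS =====

-- overwrite step of B's scalar projection
def gStep (low : String) (b : Option String) (d : String) : Option String :=
  if PySem.Str.isIn d low then some d else b

theorem bInner_eq_zipWith (dish : String) (best : List (Option String)) (lows : List String) :
    bInner dish best lows = List.zipWith (fun b low => gStep low b dish) best lows := by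
  induction best generalizing lows with
  | nil => cases lows <;> rfl
  | cons b bs ih =>
    cases lows with
    | nil => rfl
    | cons l ls => simp [bInner, List.zip, gStep] at *; exact ih ls

theorem scalar_reverse_fold (ds : List String) (low : String) :
    ds.reverse.foldl (gStep low) none = firstDishA ds low := by
  rw [List.foldl_reverse]
  induction ds with
  | nil => rfl
  | cons d ds ih =>
    simp only [gStep, PySem.Str.isIn_eq] at ih ⊢
    simp [List.foldr, firstDishA, ih]

theorem zipWith_id_left {α β : Type} (xs : List α) (ys : List β)
    (h : xs.length = ys.length) : List.zipWith (fun b _ => b) xs ys = xs := by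
  induction xs generalizing ys with
  | nil => rfl
  | cons x xs ih =>
    cases ys with
    | nil => simp at h
    | cons y ys => simp at h ⊢; exact ih ys h

theorem zipWith_zipWith_right {α β γ δ : Type} (f : γ → β → δ) (g : α → β → γ)
    (xs : List α) (ys : List β) :
    List.zipWith f (List.zipWith g xs ys) ys = List.zipWith (fun a b => f (g a b) b) xs ys := by
  induction xs generalizing ys with
  | nil => rfl
  | cons x xs ih => cases ys with
    | nil => rfl
    | cons y ys => simp [ih]

theorem vec_fold (ds : List String) (lows : List String) (best : List (Option String))
    (h : best.length = lows.length) :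
    ds.foldl (fun best dish => bInner dish best lows) best
      = List.zipWith (fun b low => ds.foldl (gStep low) b) best lows := by
  induction ds generalizing best with
  | nil => simpa using (zipWith_id_left best lows h).symm
  | cons d ds ih =>
    have hlen : (bInner d best lows).length = lows.length := by
      simp [bInner]; omega
    calc (d :: ds).foldl (fun best dish => bInner dish best lows) best
        = ds.foldl (fun best dish => bInner dish best lows) (bInner d best lows) := rfl
      _ = List.zipWith (fun b low => ds.foldl (gStep low) b) (bInner d best lows) lows :=
          ih (bInner d best lows) hlen
      _ = List.zipWith (fun b low => ds.foldl (gStep low) (gStep low b d)) best lows := by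
          rw [bInner_eq_zipWith, zipWith_zipWith_right]
      _ = List.zipWith (fun b low => (d :: ds).foldl (gStep low) b) best lows := rfl

theorem zipWith_replicate_none {β γ : Type} (f : Option String → β → γ) (xs : List β) :
    List.zipWith f (List.replicate xs.length (none : Option String)) xs = xs.map (f none) := by
  induction xs with
  | nil => rfl
  | cons x xs ih => simp [List.replicate, ih]

theorem foldlA_eq (dishes : List String) (reviews : List (String)) (acc : List (String × String)) :
    reviews.foldl (fun acc review =>
        match firstDishA dishes (PySem.Str.lower review) with
        | some d => acc ++ [(d, review)]
        | none => acc) acc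
      = acc ++ reviews.filterMap
          (fun r => (firstDishA dishes (PySem.Str.lower r)).map (fun d => (d, r))) := by
  induction reviews generalizing acc with
  | nil => simp
  | cons r rs ih =>
    simp only [List.foldl, List.filterMap]
    cases h : firstDishA dishes (PySem.Str.lower r) with
    | none => simp [ih]
    | some d => simp [ih]

theorem zip_map_filterMap (q : String → Option String) (reviews : List String) :
    ((reviews.map q).zip reviews).filterMap (fun br => br.1.map (fun d => (d, br.2)))
      = reviews.filterMap (fun r => (q r).map (fun d => (d, r))) := by
  induction reviews with
  | nil => rfl
  | cons r rs ih =>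
    simp only [List.map, List.zip, List.zipWith, List.filterMap]
    cases q r <;> simp_all [List.zip]

theorem alt_eq_filterMap (reviews dishes : List String) :
    filter_reviews_by_dishes_alt reviews dishes
      = reviews.filterMap
          (fun r => (firstDishA dishes (PySem.Str.lower r)).map (fun d => (d, r))) := by
  have h0 : filter_reviews_by_dishes_alt reviews dishes
      = ((dishes.reverse.foldl
            (fun best dish => bInner dish best (reviews.map PySem.Str.lower))
            (List.replicate reviews.length (none : Option String))).zip
          reviews).filterMap (fun br => br.1.map (fun d => (d, br.2))) := rfl
  rw [h0]
  rw [show reviews.length = (reviews.map PySem.Str.lower).length from by simp]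
  rw [vec_fold dishes.reverse (reviews.map PySem.Str.lower) _ (by simp)]
  rw [zipWith_replicate_none]
  simp only [List.map_map, scalar_reverse_fold]
  exact zip_map_filterMap _ reviews

-- ===== VERDICT (by name: the statement is the Claim_ definition above) =====
theorem filter_reviews_by_dishes_spec : Claim_equal_filter_reviews_by_dishes := by
  intro reviews dishes _
  unfold Spec_filter_reviews_by_dishes filter_reviews_by_dishes
  rw [alt_eq_filterMap, foldlA_eq]
  simp
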